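-- pv_equiv track=rewrite | github.com/PyLearnHub/PythonEvalution2024 | chemical_formula.py | chemical_formula
-- ===== SOURCE A (Python) =====
-- def sort_the_formula(formula):
--         s = ""
--         chemical_list = list(formula)
--         sort_list = sorted(chemical_list)
--         for char in sort_list:
--                 if char.isupper():
--                         s += char
--                         index = chemical_list.index(char)
--                         if index != len(chemical_list) - 1:
--                                 if chemical_list[index + 1].isdigit() or chemical_list[index + 1].islower():
--                                         s += chemical_list[index + 1]
--         return s
--
-- def chemical_formula(formula):
--         if '(' not in formula:
--                 return sort_the_formula(formula)
--         else:
--                 st = formula[:formula.index('(')]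
--                 st2 = formula[formula.index('(') + 1: formula.index(')')]
--                 st3 = ""
--                 for ele in st2:
--                         ele += formula[formula.index(')') + 1]
--                         st3 += ele
--                 return sort_the_formula(st + st3)
-- ===== SOURCE B (Python) =====
-- def chemical_formula(formula):
--     # preprocessing of one parenthesised group, as in the original
--     if '(' in formula:
--         i = formula.index('(')
--         j = formula.index(')')
--         inner = formula[i + 1:j]
--         s = formula[:i]
--         if inner:
--             mult = formula[j + 1]
--             for c in inner:
--                 s += c + mult
--     else:
--         s = formula
--     # one left-to-right pass: per distinct uppercase letter, its first-occurrence
--     # unit and its number of occurrences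
--     units = {}
--     counts = {}
--     for idx, c in enumerate(s):
--         if c.isupper():
--             counts[c] = counts.get(c, 0) + 1
--             if c not in units:
--                 nxt = s[idx + 1] if idx + 1 < len(s) else ''
--                 units[c] = c + nxt if (nxt.isdigit() or nxt.islower()) else c
--     return ''.join(units[c] * counts[c] for c in sorted(units))
-- ===== Notes on version B (the rewrite author's own statement) =====
-- stated objective: alternative
-- what changed: Instead of sorting the whole character list and doing a linear .index scan for every uppercase occurrence, B makes one left-to-right pass building a dict of each distinct uppercase letter's first-occurrence unit and a dict of occurrence counts, then emits unit*count over the sorted dict keys.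
import Mathlib
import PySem

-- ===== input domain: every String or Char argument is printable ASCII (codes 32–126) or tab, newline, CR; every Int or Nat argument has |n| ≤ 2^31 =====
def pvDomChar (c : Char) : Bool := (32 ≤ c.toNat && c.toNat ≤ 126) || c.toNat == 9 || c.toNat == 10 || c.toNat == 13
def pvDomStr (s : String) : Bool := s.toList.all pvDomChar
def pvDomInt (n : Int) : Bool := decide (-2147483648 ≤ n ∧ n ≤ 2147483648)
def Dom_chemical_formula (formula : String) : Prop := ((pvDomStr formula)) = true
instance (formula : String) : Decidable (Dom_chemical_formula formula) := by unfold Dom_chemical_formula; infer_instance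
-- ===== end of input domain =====

-- B replaces A's sort-everything-then-index-scan (a linear .index search per uppercase
-- occurrence of the sorted list) by ONE left-to-right pass building two dicts (first-occurrence
-- unit and count per distinct uppercase letter), then emits unit*count over the sorted keys
-- (objective: alternative algorithm, same observed cost).

-- ===== PORT A =====
-- Python sort_the_formula, transliterated on the character list
def sort_the_formula (l : List Char) : List Char :=
  (PySem.List.sorted l (fun x => x)).foldl (fun s char =>
    if PySem.Chars.isupper char then
      let s1 := s ++ [char]
      match PySem.List.index? l char with
      | some index =>
        if index ≠ l.length - 1 then
          match l[index + 1]? with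
          | some nxt =>
            if PySem.Chars.isdigit nxt || PySem.Chars.islower nxt then s1 ++ [nxt] else s1
          | none => s1
        else s1
      | none => s1
    else s) []

def chemical_formula (formula : String) : String :=
  let l := formula.toList
  if PySem.Chars.isIn ['('] l = false then
    String.ofList (sort_the_formula l)
  else
    match PySem.List.index? l '(', PySem.List.index? l ')' with
    | some i, some j =>
      let st := PySem.List.slice l none (some (i : Int))
      let st2 := PySem.List.slice l (some ((i : Int) + 1)) (some (j : Int))
      let st3 := st2.foldl (fun acc ele =>
        acc ++ (match PySem.List.pyGet? l ((j : Int) + 1) with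
                | some m => [ele, m]
                | none => [ele])) []      -- none = IndexError (')' is last char), excluded by Pre_
      String.ofList (sort_the_formula (st ++ st3))
    | _, _ => ""                          -- ValueError (')' absent), excluded by Pre_

-- ===== PORT B =====
-- the body of Source B's single pass: on an uppercase c, bump counts[c] and, if c is new,
-- record its unit from the character after this (first) occurrence
def cfStep (s : List Char) (st : PySem.Dict Char (List Char) × PySem.Dict Char Int)
    (pr : Int × Char) : PySem.Dict Char (List Char) × PySem.Dict Char Int :=
  let units := st.1
  let counts := st.2
  let idx := pr.1
  let c := pr.2
  if PySem.Chars.isupper c then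
    let counts' := counts.insert c (counts.getD c 0 + 1)
    let units' :=
      if units.contains c then units
      else
        -- nxt = s[idx+1] if idx+1 < len(s) else '' : idx ≥ 0 here, so pyGet? is none exactly
        -- when idx+1 is out of range
        let nxt : List Char := match PySem.List.pyGet? s (idx + 1) with
          | none => []
          | some n => [n]
        units.insert c (if (match nxt with
            | [n] => PySem.Chars.isdigit n || PySem.Chars.islower n
            | _ => false) then c :: nxt else [c])
    (units', counts')
  else (units, counts)

-- Source B's main part: one pass over enumerate(s), then unit*count over the sorted dict keys
def cfAlt_scan (s : List Char) : List Char :=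
  let r := (PySem.List.enumerate s 0).foldl (cfStep s) (PySem.Dict.empty, PySem.Dict.empty)
  ((PySem.List.sorted r.1.keys (fun x => x)).map
    (fun c => PySem.List.pyRepeat (r.1.getD c []) (r.2.getD c 0))).flatten
    -- units[c]: the key is always present, getD's default is never used

def chemical_formula_alt (formula : String) : String :=
  let l := formula.toList
  let s :=
    if PySem.Chars.isIn ['('] l then
      match PySem.List.index? l '(' with
      | none => []                        -- unreachable: '(' ∈ l in this branch
      | some i =>
        match PySem.List.index? l ')' with
        | none => []                      -- ValueError (')' absent), excluded by Pre_
        | some j =>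
          let inner := PySem.List.slice l (some ((i : Int) + 1)) (some (j : Int))
          let pre := PySem.List.slice l none (some (i : Int))
          if inner ≠ [] then
            match PySem.List.pyGet? l ((j : Int) + 1) with
            | none => pre                 -- IndexError (')' is last char), excluded by Pre_
            | some m => inner.foldl (fun acc c => acc ++ [c, m]) pre   -- s += c + mult
          else pre
    else l
  String.ofList (cfAlt_scan s)

-- ===== PRECONDITION & SPEC =====
-- A (and B) raise on formulas containing '(' where ')' is absent (ValueError) or where the
-- parenthesised part is nonempty and ')' is the last character (IndexError); Pre_ excludes exactly those.
def Pre_chemical_formula (formula : String) : Prop :=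
  '(' ∈ formula.toList →
    (')' ∈ formula.toList ∧
      (formula.toList.idxOf '(' + 1 < formula.toList.idxOf ')' →
        formula.toList.idxOf ')' + 1 < formula.toList.length))
instance (formula : String) : Decidable (Pre_chemical_formula formula) := by
  unfold Pre_chemical_formula; infer_instance

def pvWitness_chemical_formula : String := "H2O"

def Spec_chemical_formula (formula : String) (out : String) : Prop := out = chemical_formula_alt formula
instance (formula : String) (out : String) : Decidable (Spec_chemical_formula formula out) := by
  unfold Spec_chemical_formula; infer_instance

-- ===== CLAIM (what is proved, stated in full; the proofs are below) =====
def Claim_equal_chemical_formula : Prop := ∀ (formula : String), Dom_chemical_formula formula → Pre_chemical_formula formula → Spec_chemical_formula formula (chemical_formula formula)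

-- ===== LEMMAS AND PROOFS =====

-- A's per-occurrence contribution, as a function of the letter only
def pvAunit (l : List Char) (c : Char) : List Char :=
  match PySem.List.index? l c with
  | some index =>
    if index ≠ l.length - 1 then
      match l[index + 1]? with
      | some nxt =>
        if PySem.Chars.isdigit nxt || PySem.Chars.islower nxt then [c, nxt] else [c]
      | none => [c]
    else [c]
  | none => [c]

theorem pvA_flatMap (l : List Char) :
    sort_the_formula l =
      ((PySem.List.sorted l (fun x => x)).filter (fun c => PySem.Chars.isupper c)).flatMap
        (pvAunit l) := by
  unfold sort_the_formula
  have hbody : ∀ (acc : List Char), ∀ c ∈ PySem.List.sorted l (fun x => x),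
      (fun (s : List Char) (char : Char) =>
        if PySem.Chars.isupper char then
          let s1 := s ++ [char]
          match PySem.List.index? l char with
          | some index =>
            if index ≠ l.length - 1 then
              match l[index + 1]? with
              | some nxt =>
                if PySem.Chars.isdigit nxt || PySem.Chars.islower nxt then s1 ++ [nxt] else s1
              | none => s1
            else s1
          | none => s1
        else s) acc c
      = (fun (s : List Char) (char : Char) =>
          if PySem.Chars.isupper char then s ++ pvAunit l char else s) acc c := by
    intro acc c _
    by_cases h : PySem.Chars.isupper c
    · simp only [h, if_true, pvAunit]
      cases hi : PySem.List.index? l c with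
      | none => simp
      | some index =>
        by_cases hl : index ≠ l.length - 1
        · cases hg : l[index + 1]? with
          | none => simp [hl, hg]
          | some nxt =>
            by_cases hd : (PySem.Chars.isdigit nxt || PySem.Chars.islower nxt) = true
            · simp [hd, hl, hg]
            · simp [hd, hl, hg]
        · simp [hl]
    · simp [h]
  rw [PySem.List.foldl_congr_mem _ _ _ _ hbody]
  rw [PySem.List.foldl_if_eq_foldl_filter (fun c => PySem.Chars.isupper c)
    (fun acc c => acc ++ pvAunit l c)]
  rw [PySem.List.foldl_append_eq_flatMap]
  simp

theorem pvSortedFilter (l : List Char) (p : Char → Bool) :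
    (PySem.List.sorted l (fun x => x)).filter p = PySem.List.sorted (l.filter p) (fun x => x) := by
  apply PySem.List.eq_of_perm_of_pairwise_le_of_injective (fun x : Char => x) (fun a b h => h)
  · exact ((PySem.List.sorted_perm l (fun x => x) false).filter p).trans
      ((PySem.List.sorted_perm (l.filter p) (fun x => x) false).symm)
  · exact (PySem.List.sorted_pairwise l (fun x => x)).sublist List.filter_sublist
  · exact PySem.List.sorted_pairwise (l.filter p) (fun x => x)

theorem pvCountFlat (xs : List Char) (ds : List Char) (hnd : ds.Nodup) (a : Char) :
    List.count a (ds.flatMap (fun c => List.replicate (xs.count c) c)) =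
      if a ∈ ds then xs.count a else 0 := by
  induction ds with
  | nil => simp
  | cons c t ih =>
    have hnd' := hnd.of_cons
    have hct : c ∉ t := (List.nodup_cons.mp hnd).1
    simp only [List.flatMap_cons, List.count_append, ih hnd', List.count_replicate]
    by_cases hac : a = c
    · subst hac
      simp [hct]
    · have hca : ¬ c = a := fun h => hac h.symm
      by_cases hat : a ∈ t <;> simp [hac, hca, hat, List.mem_cons]

theorem pvFlatPairwise (ds : List Char) (n : Char → Nat) (h : ds.Pairwise (· < ·)) :
    (ds.flatMap (fun c => List.replicate (n c) c)).Pairwise (· ≤ ·) := by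
  induction ds with
  | nil => simp
  | cons c t ih =>
    have h' := h.of_cons
    simp only [List.flatMap_cons]
    rw [List.pairwise_append]
    refine ⟨List.pairwise_replicate.mpr (Or.inr le_rfl), ih h', ?_⟩
    intro x hx y hy
    rw [List.eq_of_mem_replicate hx]
    rw [List.mem_flatMap] at hy
    obtain ⟨d, hd, hyd⟩ := hy
    rw [List.eq_of_mem_replicate hyd]
    exact le_of_lt ((List.pairwise_cons.mp h).1 d hd)

-- sorted-list grouping: sorting equals the sorted distinct values, each replicated by its count
theorem pvGrouping (xs : List Char) :
    PySem.List.sorted xs (fun x => x) =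
      (PySem.List.sorted (PySem.Set.ofList xs) (fun x => x)).flatMap
        (fun c => List.replicate (xs.count c) c) := by
  have hlt := PySem.List.sorted_ofList_pairwise_lt xs
  have hnd : (PySem.List.sorted (PySem.Set.ofList xs) (fun x => x)).Nodup :=
    hlt.imp ne_of_lt
  have hmem : ∀ a : Char, a ∈ PySem.List.sorted (PySem.Set.ofList xs) (fun x => x) ↔ a ∈ xs := by
    intro a
    rw [PySem.List.mem_sorted]
    exact PySem.Set.mem_ofList xs a
  apply PySem.List.eq_of_perm_of_pairwise_le_of_injective (fun x : Char => x) (fun a b h => h)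
  · refine (PySem.List.sorted_perm xs (fun x => x) false).trans (List.perm_iff_count.mpr ?_).symm
    intro a
    rw [pvCountFlat xs _ hnd a]
    by_cases ha : a ∈ PySem.List.sorted (PySem.Set.ofList xs) (fun x => x)
    · simp [ha]
    · have : a ∉ xs := fun h => ha ((hmem a).mpr h)
      simp [ha, List.count_eq_zero_of_not_mem this]
  · exact PySem.List.sorted_pairwise xs (fun x => x)
  · exact pvFlatPairwise _ _ hlt

theorem pvFlatRep {α : Type} (n : Nat) (c : α) (f : α → List α) :
    (List.replicate n c).flatMap f = (List.replicate n (f c)).flatten := by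
  induction n with
  | zero => simp
  | succ m ih => simp [List.replicate_succ, ih]

-- A's scan, in grouped form: sorted distinct uppercase letters, unit repeated by count
theorem pvA_spec (s : List Char) :
    sort_the_formula s =
      (PySem.List.sorted (PySem.Set.ofList (s.filter (fun c => PySem.Chars.isupper c)))
          (fun x => x)).flatMap
        (fun c => PySem.List.pyRepeat (pvAunit s c) ((s.count c : Int))) := by
  rw [pvA_flatMap, pvSortedFilter,
    pvGrouping (s.filter (fun c => PySem.Chars.isupper c)), List.flatMap_assoc]
  rw [List.flatMap_def, List.flatMap_def]
  congr 1
  apply List.map_congr_left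
  intro c hc
  have hcx : c ∈ s.filter (fun c => PySem.Chars.isupper c) := by
    rw [PySem.List.mem_sorted] at hc
    exact (PySem.Set.mem_ofList _ c).mp hc
  have hp : PySem.Chars.isupper c = true := List.of_mem_filter hcx
  have hcount : (s.filter (fun c => PySem.Chars.isupper c)).count c = s.count c :=
    List.count_filter hp
  rw [hcount, pvFlatRep]
  unfold PySem.List.pyRepeat
  simp

-- first occurrence of a fresh element appended after p
theorem pvIndex?_append_cons (p t : List Char) (c : Char) (h : c ∉ p) :
    PySem.List.index? (p ++ c :: t) c = some p.length := by
  rw [PySem.List.index?_eq_idxOf?]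
  induction p with
  | nil => simp [List.idxOf?_cons]
  | cons a r ih =>
    have hac : ¬ a = c := fun hh => h (hh ▸ List.mem_cons_self)
    have hr : c ∉ r := fun hh => h (List.mem_cons_of_mem a hh)
    simp [List.idxOf?_cons, hac, ih hr]

-- the freshly stored unit is A's unit for that letter
theorem pvStored_unit (p t : List Char) (c : Char) (h : c ∉ p) :
    (if (match (match PySem.List.pyGet? (p ++ c :: t) ((p.length : Int) + 1) with
          | none => ([] : List Char)
          | some n => [n]) with
        | [n] => PySem.Chars.isdigit n || PySem.Chars.islower n
        | _ => false) = true
      then c :: (match PySem.List.pyGet? (p ++ c :: t) ((p.length : Int) + 1) with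
          | none => ([] : List Char)
          | some n => [n])
      else [c]) = pvAunit (p ++ c :: t) c := by
  have hidx : PySem.List.index? (p ++ c :: t) c = some p.length := pvIndex?_append_cons p t c h
  have hcast : (p.length : Int) + 1 = ((p.length + 1 : Nat) : Int) := by push_cast; ring
  rw [hcast, PySem.List.pyGet?_natCast]
  unfold pvAunit
  rw [hidx]
  cases t with
  | nil =>
    have hlen : (p ++ [c]).length = p.length + 1 := by simp
    have hne : ¬ (p.length ≠ (p ++ [c]).length - 1) := by simp [hlen]
    have hg : (p ++ [c])[p.length + 1]? = none := by
      rw [List.getElem?_eq_none_iff]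
      simp
    simp
  | cons d t' =>
    have hlen : (p ++ c :: d :: t').length = p.length + t'.length + 2 := by simp; omega
    have hne : p.length ≠ (p ++ c :: d :: t').length - 1 := by omega
    have hlt : p.length + 1 < (p ++ c :: d :: t').length := by omega
    have hg : (p ++ c :: d :: t')[p.length + 1]? = some d := by
      rw [List.getElem?_eq_getElem hlt]
      congr 1
      rw [List.getElem_append_right (by omega)]
      simp
    rw [hg]
    simp only [hne, if_true, ne_eq, not_false_iff]
    by_cases hd : (PySem.Chars.isdigit d || PySem.Chars.islower d) = true
    · simp [hd]
    · simp [hd]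

-- invariant of Source B's single pass: after processing the prefix p of s, units maps exactly the
-- uppercase letters of p to their units, counts to their counts in p, and keys stay unique
theorem pvBuild_inv (s : List Char) (t : List Char) :
    ∀ (p : List Char) (units : PySem.Dict Char (List Char)) (counts : PySem.Dict Char Int),
    s = p ++ t →
    units.keys.Nodup →
    (∀ c, units.get? c =
      if PySem.Chars.isupper c = true ∧ c ∈ p then some (pvAunit s c) else none) →
    (∀ c, counts.get? c =
      if PySem.Chars.isupper c = true ∧ c ∈ p then some ((p.count c : Int)) else none) →
    (((PySem.List.enumerate t (p.length : Int)).foldl (cfStep s) (units, counts)).1.keys.Nodup ∧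
     (∀ c, ((PySem.List.enumerate t (p.length : Int)).foldl (cfStep s) (units, counts)).1.get? c =
        if PySem.Chars.isupper c = true ∧ c ∈ s then some (pvAunit s c) else none) ∧
     (∀ c, ((PySem.List.enumerate t (p.length : Int)).foldl (cfStep s) (units, counts)).2.get? c =
        if PySem.Chars.isupper c = true ∧ c ∈ s then some ((s.count c : Int)) else none)) := by
  induction t with
  | nil =>
    intro p units counts hs hnd hu hc
    simp only [PySem.List.enumerate_nil, List.foldl_nil]
    rw [List.append_nil] at hs
    subst hs
    exact ⟨hnd, hu, hc⟩
  | cons c t' ih =>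
    intro p units counts hs hnd hu hc
    rw [PySem.List.enumerate_cons, List.foldl_cons]
    have hlen' : (p.length : Int) + 1 = (((p ++ [c]).length : Nat) : Int) := by
      simp
    by_cases hup : PySem.Chars.isupper c = true
    · -- uppercase: counts bumped, units extended iff c is new
      by_cases hcon : units.contains c = true
      · -- c already seen
        have hsome : (units.get? c).isSome := by
          rw [← PySem.Dict.contains_eq_isSome_get?]; exact hcon
        have hcp : c ∈ p := by
          by_contra hcp
          rw [hu c, if_neg (fun hh => hcp hh.2)] at hsome
          simp at hsome
        have hstep : cfStep s (units, counts) ((p.length : Int), c)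
            = (units, counts.insert c (counts.getD c 0 + 1)) := by
          simp [cfStep, hup, hcon]
        rw [hstep, hlen']
        apply ih (p ++ [c]) _ _ (by simpa using hs) hnd
        · intro x
          rw [hu x]
          by_cases hxc : x = c
          · subst hxc
            simp [hup, hcp, List.mem_append]
          · simp [List.mem_append, hxc]
        · intro x
          by_cases hxc : x = c
          · subst hxc
            rw [PySem.Dict.get?_insert_self]
            have hgd : counts.getD x 0 = (p.count x : Int) := by
              simp [PySem.Dict.getD, hc x, hup, hcp]
            rw [hgd]
            simp [hup, List.mem_append, List.count_append]
          · rw [PySem.Dict.get?_insert_of_ne _ _ hxc, hc x]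
            have hcx : ¬ c = x := fun hh => hxc hh.symm
            have hcnt : (p ++ [c]).count x = p.count x := by
              simp [List.count_append, hcx]
            simp [List.mem_append, hxc, hcnt]
      · -- first occurrence of c
        have hnone : units.get? c = none := by
          rw [PySem.Dict.contains_eq_isSome_get?] at hcon
          cases hg : units.get? c with
          | none => rfl
          | some v => rw [hg] at hcon; simp at hcon
        have hcp : c ∉ p := by
          intro hcp
          rw [hu c, if_pos ⟨hup, hcp⟩] at hnone
          simp at hnone
        have hsplit : s = p ++ c :: t' := hs
        have hstep : cfStep s (units, counts) ((p.length : Int), c)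
            = (units.insert c (pvAunit s c), counts.insert c (counts.getD c 0 + 1)) := by
          simp only [cfStep, hup, if_true, hcon, Bool.false_eq_true, if_false]
          have := pvStored_unit p t' c hcp
          rw [hsplit]
          simp only [this]
        rw [hstep, hlen']
        apply ih (p ++ [c]) _ _ (by simpa using hs)
          (PySem.Dict.nodup_keys_insert _ _ _ hnd)
        · intro x
          by_cases hxc : x = c
          · subst hxc
            rw [PySem.Dict.get?_insert_self]
            simp [hup, List.mem_append]
          · rw [PySem.Dict.get?_insert_of_ne _ _ hxc, hu x]
            simp [List.mem_append, hxc]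
        · intro x
          by_cases hxc : x = c
          · subst hxc
            rw [PySem.Dict.get?_insert_self]
            have hgd : counts.getD x 0 = (p.count x : Int) := by
              have hc0 : p.count x = 0 := List.count_eq_zero_of_not_mem hcp
              simp [PySem.Dict.getD, hc x, hcp, hc0]
            rw [hgd]
            simp [hup, List.mem_append, List.count_append]
          · rw [PySem.Dict.get?_insert_of_ne _ _ hxc, hc x]
            have hcx : ¬ c = x := fun hh => hxc hh.symm
            have hcnt : (p ++ [c]).count x = p.count x := by
              simp [List.count_append, hcx]
            simp [List.mem_append, hxc, hcnt]
    · -- not uppercase: state unchanged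
      have hstep : cfStep s (units, counts) ((p.length : Int), c) = (units, counts) := by
        simp [cfStep, hup]
      rw [hstep, hlen']
      apply ih (p ++ [c]) _ _ (by simpa using hs) hnd
      · intro x
        rw [hu x]
        by_cases hxc : x = c
        · subst hxc
          simp [hup]
        · simp [List.mem_append, hxc]
      · intro x
        rw [hc x]
        by_cases hxc : x = c
        · subst hxc
          simp [hup]
        · have hcx : ¬ c = x := fun hh => hxc hh.symm
          have hcnt : (p ++ [c]).count x = p.count x := by
            simp [List.count_append, hcx]
          simp [List.mem_append, hxc, hcnt]

-- B's scan, in the same grouped form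
theorem pvB_spec (s : List Char) :
    cfAlt_scan s =
      (PySem.List.sorted (PySem.Set.ofList (s.filter (fun c => PySem.Chars.isupper c)))
          (fun x => x)).flatMap
        (fun c => PySem.List.pyRepeat (pvAunit s c) ((s.count c : Int))) := by
  obtain ⟨hnd, hu, hc⟩ := pvBuild_inv s s [] PySem.Dict.empty PySem.Dict.empty rfl
    (by simp [PySem.Dict.keys_empty])
    (by intro c; simp [PySem.Dict.get?_empty])
    (by intro c; simp [PySem.Dict.get?_empty])
  simp only [List.length_nil, Nat.cast_zero] at hnd hu hc
  show ((PySem.List.sorted ((PySem.List.enumerate s 0).foldl (cfStep s)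
        (PySem.Dict.empty, PySem.Dict.empty)).1.keys (fun x => x)).map
      (fun c => PySem.List.pyRepeat
        (((PySem.List.enumerate s 0).foldl (cfStep s)
          (PySem.Dict.empty, PySem.Dict.empty)).1.getD c [])
        (((PySem.List.enumerate s 0).foldl (cfStep s)
          (PySem.Dict.empty, PySem.Dict.empty)).2.getD c 0))).flatten = _
  set r := (PySem.List.enumerate s 0).foldl (cfStep s)
    (PySem.Dict.empty, PySem.Dict.empty) with hr
  have hkeys : ∀ x, x ∈ r.1.keys ↔ (PySem.Chars.isupper x = true ∧ x ∈ s) := by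
    intro x
    constructor
    · intro hx
      by_contra hcond
      have := (PySem.Dict.get?_eq_none_iff_not_mem_keys r.1 x).mp (by rw [hu x, if_neg hcond])
      exact this hx
    · intro hcond
      by_contra hx
      have := (PySem.Dict.get?_eq_none_iff_not_mem_keys r.1 x).mpr hx
      rw [hu x, if_pos hcond] at this
      simp at this
  have hL := PySem.List.sorted_ofList_pairwise_lt
    (s.filter (fun c => PySem.Chars.isupper c))
  have hLnd : (PySem.List.sorted (PySem.Set.ofList (s.filter (fun c => PySem.Chars.isupper c)))
      (fun x => x)).Nodup := hL.imp ne_of_lt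
  have hperm : (PySem.List.sorted (PySem.Set.ofList (s.filter (fun c => PySem.Chars.isupper c)))
      (fun x => x)).Perm r.1.keys := by
    rw [List.perm_ext_iff_of_nodup hLnd hnd]
    intro a
    rw [PySem.List.mem_sorted, PySem.Set.mem_ofList, List.mem_filter, hkeys a]
    tauto
  rw [PySem.List.sorted_eq_of_perm_of_pairwise_lt _ _ _ hperm hL]
  rw [List.flatMap_def]
  congr 1
  apply List.map_congr_left
  intro c hcmem
  have hcond : PySem.Chars.isupper c = true ∧ c ∈ s := by
    rw [PySem.List.mem_sorted, PySem.Set.mem_ofList, List.mem_filter] at hcmem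
    exact ⟨hcmem.2, hcmem.1⟩
  have h1 : r.1.getD c [] = pvAunit s c := by simp [PySem.Dict.getD, hu c, hcond]
  have h2 : r.2.getD c 0 = (s.count c : Int) := by simp [PySem.Dict.getD, hc c, hcond]
  rw [h1, h2]

-- the central fact: A's scan and B's scan agree on every character list
theorem pvScan_eq (s : List Char) : sort_the_formula s = cfAlt_scan s := by
  rw [pvA_spec, pvB_spec]

theorem pvIndex?_mem (l : List Char) (c : Char) (h : c ∈ l) :
    PySem.List.index? l c = some (l.idxOf c) := by
  rw [PySem.List.index?_eq_idxOf?]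
  induction l with
  | nil => cases h
  | cons a t ih =>
    by_cases hac : a = c
    · subst hac; simp [List.idxOf?_cons]
    · have : c ∈ t := by cases h with | head => exact absurd rfl hac | tail _ h => exact h
      simp [List.idxOf?_cons, hac, ih this]

theorem pvSliceNe (l : List Char) (i j : Nat) (hj : j ≤ l.length)
    (h : PySem.List.slice l (some ((i : Int) + 1)) (some (j : Int)) ≠ []) : i + 1 < j := by
  by_contra hc
  push Not at hc
  apply h
  simp only [PySem.List.slice, PySem.List.clampIdx]
  rw [List.take_eq_nil_iff]
  left
  have h1 : ¬ ((i : Int) + 1 < 0) := by omega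
  have h2 : ¬ ((j : Int) < 0) := by omega
  simp only [h1, h2, if_false]
  have : ((i : Int) + 1).toNat = i + 1 := by omega
  rw [this]
  have : ((j : Int)).toNat = j := by omega
  rw [this]
  omega

theorem pvIsIn_mem (l : List Char) (c : Char) :
    PySem.Chars.isIn [c] l = true ↔ c ∈ l := by
  rw [PySem.Chars.isIn_iff_infix]
  exact List.singleton_infix_iff c l

-- ===== VERDICT (by name: the statement is the Claim_ definition above) =====
theorem chemical_formula_spec : Claim_equal_chemical_formula := by
  intro formula _ hpre
  unfold Spec_chemical_formula
  simp only [chemical_formula, chemical_formula_alt]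
  cases hin : PySem.Chars.isIn ['('] formula.toList with
  | false =>
    simp only [Bool.false_eq_true, if_true, if_false, pvScan_eq]
  | true =>
    have hin' : PySem.Chars.isIn ['('] formula.toList = true := hin
    simp only [Bool.true_eq_false, if_true, if_false]
    have hmem : '(' ∈ formula.toList := (pvIsIn_mem _ _).mp hin'
    obtain ⟨hmem', hlast⟩ := hpre hmem
    have h1 : PySem.List.index? formula.toList '(' = some (formula.toList.idxOf '(') :=
      pvIndex?_mem _ _ hmem
    have h2 : PySem.List.index? formula.toList ')' = some (formula.toList.idxOf ')') :=
      pvIndex?_mem _ _ hmem'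
    rw [h1, h2]
    set l := formula.toList with hl
    set i := l.idxOf '(' with hi
    set j := l.idxOf ')' with hjdef
    have hjlen : j < l.length := List.idxOf_lt_length_iff.mpr hmem'
    by_cases hinner : PySem.List.slice l (some ((i : Int) + 1)) (some (j : Int)) = []
    · simp only [hinner, ne_eq, not_true_eq_false, if_false, List.foldl_nil,
        List.append_nil, pvScan_eq]
    · have hij : i + 1 < j := pvSliceNe l i j (le_of_lt hjlen) hinner
      have hj1 : j + 1 < l.length := hlast hij
      have hget : PySem.List.pyGet? l ((j : Int) + 1) = some l[j + 1] := by
        have hc : ((j : Int) + 1) = ((j + 1 : Nat) : Int) := by push_cast; ring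
        rw [hc, PySem.List.pyGet?_natCast]
        exact List.getElem?_eq_getElem hj1
      simp only [hget, hinner, ne_eq, not_false_iff, if_true]
      rw [PySem.List.foldl_append_eq_flatMap (fun ele => [ele, l[j + 1]]),
          PySem.List.foldl_append_eq_flatMap (fun ele => [ele, l[j + 1]])]
      simp only [List.nil_append, pvScan_eq]
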